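-- pv_equiv track=rewrite | github.com/ntpz870817/Chamaeleo | methods/components/motif_validity.py | inverse_motif_repeat
-- ===== SOURCE A (Python) =====
-- def inverse_motif_repeat(dna_motif, max_repeat):
--     """
--     introduction: Compute the inverse repetition of fragments in a DNA motif.
--
--     :param dna_motif: DNA motif for detection.
--                        Type: string.
--
--     :param max_repeat: Maximum repetition times.
--                         More than that time, the DNA motif was considered unfriendly.
--
--     :return: Whether DNA motif conforms to the friendliness or not.
--     """
--     length = len(dna_motif) - 1
--     while length > max_repeat:
--         for index in range(0, len(dna_motif) - 2 * length):
--             sample = dna_motif[index: index + length]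
--             inverse_sample = sample[::-1]
--             if dna_motif.count(inverse_sample) > 0:
--                 return False
--         length -= 1
--
--     return True
-- ===== SOURCE B (Python) =====
-- def inverse_motif_repeat(dna_motif, max_repeat):
--     n = len(dna_motif)
--     L = max_repeat + 1
--     if n - 1 <= max_repeat or n - 2 * L < 1:
--         return True
--     if L <= 0:
--         return False  # the reversed empty fragment occurs everywhere
--     substrings = {dna_motif[j:j + L] for j in range(n - L + 1)}
--     for index in range(n - 2 * L):
--         if dna_motif[index:index + L][::-1] in substrings:
--             return False
--     return True
-- ===== Notes on version B (the rewrite author's own statement) =====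
-- stated objective: faster
-- what changed: Instead of scanning every fragment length from len-1 down to max_repeat+1 and calling str.count for each start index, B uses the downward monotonicity of inverse-repeat hits to test only the single length max_repeat+1, against a prebuilt hash set of all substrings of that length.
import Mathlib
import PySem

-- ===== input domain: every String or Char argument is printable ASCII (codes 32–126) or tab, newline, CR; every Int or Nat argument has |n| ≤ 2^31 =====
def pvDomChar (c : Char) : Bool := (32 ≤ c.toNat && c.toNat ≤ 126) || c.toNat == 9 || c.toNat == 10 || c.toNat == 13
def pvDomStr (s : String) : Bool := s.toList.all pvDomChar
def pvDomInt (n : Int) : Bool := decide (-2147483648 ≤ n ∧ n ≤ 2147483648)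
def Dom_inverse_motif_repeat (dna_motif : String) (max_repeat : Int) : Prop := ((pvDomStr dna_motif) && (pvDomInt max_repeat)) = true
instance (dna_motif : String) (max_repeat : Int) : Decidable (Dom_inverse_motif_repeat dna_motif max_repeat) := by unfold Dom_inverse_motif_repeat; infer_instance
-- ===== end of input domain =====

-- B checks only fragment length max_repeat+1 (hits are downward-monotone) against a set of
-- all substrings of that length, instead of A's scan of every length with str.count.

-- ===== PORT A =====
-- the 'for index in range(0, len(dna_motif) - 2*length)' loop; returns true iff A's 'return False' fires
def pvAFor (s : List Char) (length : Int) : List Int → Bool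
  | [] => false
  | index :: rest =>
    let sample := PySem.List.slice s (some index) (some (index + length))
    let inverse_sample := (PySem.List.slice? sample none none (-1)).getD []
    if 0 < PySem.Chars.count s inverse_sample then true
    else pvAFor s length rest

-- A's while loop over decreasing 'length'
def pvAWhile (s : List Char) (max_repeat : Int) (length : Int) : Bool :=
  if max_repeat < length then
    if pvAFor s length (PySem.List.pyRange 0 (PySem.List.len s - 2 * length)) then false
    else pvAWhile s max_repeat (length - 1)
  else true
termination_by (length - max_repeat).toNat
decreasing_by omega

def inverse_motif_repeat (dna_motif : String) (max_repeat : Int) : Bool :=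
  pvAWhile dna_motif.toList max_repeat (PySem.Str.len dna_motif - 1)

-- ===== PORT B =====
def pvBFor (s : List Char) (subs : PySem.Set (List Char)) (L : Int) : List Int → Bool
  | [] => true
  | index :: rest =>
    let sample := PySem.List.slice s (some index) (some (index + L))
    if subs.contains ((PySem.List.slice? sample none none (-1)).getD []) then false
    else pvBFor s subs L rest

def inverse_motif_repeat_alt (dna_motif : String) (max_repeat : Int) : Bool :=
  let s := dna_motif.toList
  let n : Int := PySem.List.len s
  let L : Int := max_repeat + 1
  if n - 1 ≤ max_repeat ∨ n - 2 * L < 1 then true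
  else if L ≤ 0 then false  -- the reversed empty fragment occurs everywhere
  else
    let subs := PySem.Set.ofList
      ((PySem.List.pyRange 0 (n - L + 1)).map (fun j => PySem.List.slice s (some j) (some (j + L))))
    pvBFor s subs L (PySem.List.pyRange 0 (n - 2 * L))

-- ===== PRECONDITION & SPEC =====
def Spec_inverse_motif_repeat (dna_motif : String) (max_repeat : Int) (out : Bool) : Prop := out = inverse_motif_repeat_alt dna_motif max_repeat
instance (dna_motif : String) (max_repeat : Int) (out : Bool) : Decidable (Spec_inverse_motif_repeat dna_motif max_repeat out) := by unfold Spec_inverse_motif_repeat; infer_instance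

-- ===== CLAIM (what is proved, stated in full; the proofs are below) =====
def Claim_equal_inverse_motif_repeat : Prop := ∀ (dna_motif : String) (max_repeat : Int), Dom_inverse_motif_repeat dna_motif max_repeat → Spec_inverse_motif_repeat dna_motif max_repeat (inverse_motif_repeat dna_motif max_repeat)

-- ===== LEMMAS AND PROOFS =====

-- 'the reverse of the slice of length L at i occurs in s'
def pvOcc (s : List Char) (L i : Int) : Prop :=
  (PySem.List.slice s (some i) (some (i + L))).reverse <:+: s

-- 'some index of A's inner loop at fragment length L fires'
def pvHit (s : List Char) (L : Int) : Prop :=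
  ∃ i : Int, 0 ≤ i ∧ i < (s.length : Int) - 2 * L ∧ pvOcc s L i

theorem pvGo_acc_le (sub : List Char) : ∀ (fuel : Nat) (l : List Char) (acc : Nat),
    acc ≤ PySem.Chars.count.go sub fuel l acc := by
  intro fuel
  induction fuel with
  | zero => intro l acc; simp [PySem.Chars.count.go]
  | succ fuel ih =>
    intro l acc
    cases l with
    | nil => simp [PySem.Chars.count.go]
    | cons h t =>
      simp only [PySem.Chars.count.go]
      split
      · exact le_trans (Nat.le_succ acc) (ih _ _)
      · exact ih _ _

theorem pvGo_eq_acc_iff (sub : List Char) (hsub : sub ≠ []) :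
    ∀ (fuel : Nat) (l : List Char) (acc : Nat), l.length ≤ fuel →
    (PySem.Chars.count.go sub fuel l acc = acc ↔ ∀ j, ¬ sub <+: l.drop j) := by
  intro fuel
  induction fuel with
  | zero =>
    intro l acc hl
    cases l with
    | nil => simp [PySem.Chars.count.go, List.prefix_nil, hsub]
    | cons h t => simp at hl
  | succ fuel ih =>
    intro l acc hl
    cases l with
    | nil => simp [PySem.Chars.count.go, List.prefix_nil, hsub]
    | cons h t =>
      simp only [PySem.Chars.count.go]
      split
      · rename_i hpre
        constructor
        · intro he
          have := pvGo_acc_le sub fuel (List.drop sub.length (h :: t)) (acc + 1)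
          omega
        · intro hall
          exact absurd (List.isPrefixOf_iff_prefix.mp hpre) (by simpa using hall 0)
      · rename_i hpre
        rw [ih t acc (by simp at hl; omega)]
        constructor
        · intro hall j
          cases j with
          | zero =>
            intro hp
            exact hpre (List.isPrefixOf_iff_prefix.mpr hp)
          | succ j => simpa using hall j
        · intro hall j
          simpa using hall (j + 1)

theorem pvCount_pos_iff (s sub : List Char) :
    0 < PySem.Chars.count s sub ↔ sub <:+: s := by
  by_cases h : sub = []
  · subst h
    simp [PySem.Chars.count]
  · unfold PySem.Chars.count
    simp only [List.isEmpty_iff, h, if_false]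
    rw [← PySem.Chars.isIn_iff_infix, ← PySem.Chars.exists_prefix_drop_iff_isIn]
    have hiff := pvGo_eq_acc_iff sub h s.length s 0 (le_refl _)
    constructor
    · intro hpos
      by_contra hno
      push_neg at hno
      have : PySem.Chars.count.go sub s.length s 0 = 0 :=
        hiff.mpr (fun j hp => hno j hp)
      omega
    · rintro ⟨j, hj⟩
      rcases Nat.lt_or_ge 0 (PySem.Chars.count.go sub s.length s 0) with hp | hp
      · exact hp
      · have h0 : PySem.Chars.count.go sub s.length s 0 = 0 := by omega
        exact absurd hj (hiff.mp h0 j)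

theorem pvAFor_true_iff (s : List Char) (L : Int) :
    ∀ (a b : Int), (pvAFor s L (PySem.List.pyRange a b) = true ↔ ∃ i, a ≤ i ∧ i < b ∧ pvOcc s L i) := by
  intro a b
  by_cases h : b ≤ a
  · rw [PySem.List.pyRange_one_eq_nil h]
    constructor
    · intro h'; simp [pvAFor] at h'
    · rintro ⟨i, h1, h2, _⟩; omega
  · push_neg at h
    obtain ⟨k, hk⟩ : ∃ k : Nat, b = a + 1 + (k : Int) := ⟨(b - a - 1).toNat, by omega⟩
    subst hk
    clear h
    induction k generalizing a with
    | zero =>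
      rw [PySem.List.pyRange_one_cons (by omega), PySem.List.pyRange_one_eq_nil (by omega)]
      simp only [pvAFor, PySem.List.slice?_none_none_neg_one, Option.getD_some, pvCount_pos_iff]
      by_cases hocc : (PySem.List.slice s (some a) (some (a + L))).reverse <:+: s
      · rw [if_pos hocc]
        exact ⟨fun _ => ⟨a, le_refl _, by omega, hocc⟩, fun _ => rfl⟩
      · rw [if_neg hocc]
        constructor
        · intro h'; exact absurd h' (by simp)
        · rintro ⟨i, h1, h2, h3⟩
          have : i = a := by omega
          subst this
          exact absurd h3 hocc
    | succ k ih =>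
      rw [PySem.List.pyRange_one_cons (by omega)]
      simp only [pvAFor, PySem.List.slice?_none_none_neg_one, Option.getD_some, pvCount_pos_iff]
      by_cases hocc : (PySem.List.slice s (some a) (some (a + L))).reverse <:+: s
      · rw [if_pos hocc]
        exact ⟨fun _ => ⟨a, le_refl _, by omega, hocc⟩, fun _ => rfl⟩
      · rw [if_neg hocc]
        have hstep := ih (a + 1)
        rw [show a + 1 + 1 + (k : Int) = a + 1 + ((k + 1 : Nat) : Int) by push_cast; ring] at hstep
        rw [hstep]
        constructor
        · rintro ⟨i, h1, h2, h3⟩; exact ⟨i, by omega, h2, h3⟩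
        · rintro ⟨i, h1, h2, h3⟩
          rcases lt_or_eq_of_le h1 with h' | h'
          · exact ⟨i, by omega, h2, h3⟩
          · exfalso; subst h'; exact hocc h3

theorem pvHit_of_nonpos (s : List Char) (L : Int) (hL : L ≤ 0) (hn : L < (s.length : Int)) :
    pvHit s L := by
  refine ⟨-L, by omega, by omega, ?_⟩
  unfold pvOcc
  have hsl : PySem.List.slice s (some (-L)) (some (-L + L)) = [] := by
    rw [show -L + L = (0 : Int) by ring]
    rw [PySem.List.slice_toNat s (by omega) (le_refl 0)]
    simp
  rw [hsl]
  simp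

theorem pvSlice_len (s : List Char) (i L : Int) (hi : 0 ≤ i) (hL : 0 ≤ L)
    (hn : i + L ≤ (s.length : Int)) :
    (PySem.List.slice s (some i) (some (i + L))).length = L.toNat := by
  rw [PySem.List.slice_toNat s hi (by omega)]
  simp only [List.length_take, List.length_drop]
  omega

theorem pvHit_mono (s : List Char) (L : Int) (h : pvHit s L) : pvHit s (L - 1) := by
  obtain ⟨i, h1, h2, h3⟩ := h
  by_cases hL : L ≤ 1
  · exact pvHit_of_nonpos s (L - 1) (by omega) (by omega)
  · push_neg at hL
    refine ⟨i + 1, by omega, by omega, ?_⟩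
    unfold pvOcc at h3 ⊢
    have hs1 : PySem.List.slice s (some i) (some (i + L)) = (s.drop i.toNat).take L.toNat := by
      rw [PySem.List.slice_toNat s h1 (by omega)]
      congr 1
      omega
    have hs2 : PySem.List.slice s (some (i + 1)) (some (i + 1 + (L - 1)))
        = ((s.drop i.toNat).take L.toNat).drop 1 := by
      rw [PySem.List.slice_toNat s (by omega) (by omega)]
      rw [List.drop_take, List.drop_drop]
      congr 1
      · omega
      · congr 1
        omega
    rw [hs2]
    refine List.IsInfix.trans ?_ (hs1 ▸ h3)
    exact (List.reverse_prefix.mpr (List.drop_suffix _ _)).isInfix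

theorem pvHit_chain (s : List Char) (M : Int) :
    ∀ (L : Int), M + 1 ≤ L → pvHit s L → pvHit s (M + 1) := by
  intro L hL
  obtain ⟨k, hk⟩ : ∃ k : Nat, L = M + 1 + (k : Int) := ⟨(L - M - 1).toNat, by omega⟩
  subst hk
  clear hL
  induction k with
  | zero => simpa using id
  | succ k ih =>
    intro h
    apply ih
    have hstep := pvHit_mono s (M + 1 + ((k + 1 : Nat) : Int)) h
    rw [show M + 1 + ((k + 1 : Nat) : Int) - 1 = M + 1 + ((k : Nat) : Int) by push_cast; ring] at hstep
    exact hstep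

theorem pvAWhile_char (s : List Char) (M : Int) :
    ∀ (length : Int), (pvAWhile s M length = false ↔ (M < length ∧ pvHit s (M + 1))) := by
  suffices h : ∀ (k : Nat) (length : Int), (length - M).toNat = k →
      (pvAWhile s M length = false ↔ (M < length ∧ pvHit s (M + 1))) by
    intro length; exact h _ length rfl
  intro k
  induction k with
  | zero =>
    intro length hk
    rw [pvAWhile]
    rw [if_neg (show ¬ M < length by omega)]
    simp only [Bool.true_eq_false, false_iff]
    rintro ⟨h1, _⟩
    omega
  | succ k ih =>
    intro length hk
    have hlt : M < length := by omega
    rw [pvAWhile, if_pos hlt]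
    have hfor := pvAFor_true_iff s length 0 (PySem.List.len s - 2 * length)
    by_cases hh : pvHit s length
    · have hf : pvAFor s length (PySem.List.pyRange 0 (PySem.List.len s - 2 * length)) = true := by
        rw [hfor]
        obtain ⟨i, h1, h2, h3⟩ := hh
        exact ⟨i, h1, by simpa [PySem.List.len_eq] using h2, h3⟩
      rw [hf, if_pos rfl]
      simp only [true_iff]
      exact ⟨hlt, pvHit_chain s M length (by omega) hh⟩
    · have hf : pvAFor s length (PySem.List.pyRange 0 (PySem.List.len s - 2 * length)) = false := by
        rw [Bool.eq_false_iff, ne_eq, hfor]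
        rintro ⟨i, h1, h2, h3⟩
        exact hh ⟨i, h1, by simpa [PySem.List.len_eq] using h2, h3⟩
      rw [hf]
      rw [if_neg (by simp)]
      have hk' : (length - 1 - M).toNat = k := by clear hfor hf hh; omega
      rw [ih (length - 1) hk']
      constructor
      · rintro ⟨h1, h2⟩; exact ⟨by omega, h2⟩
      · rintro ⟨h1, h2⟩
        by_cases h' : M < length - 1
        · exact ⟨h', h2⟩
        · exfalso
          have : length = M + 1 := by omega
          subst this
          exact hh h2

theorem pvMem_subs (s : List Char) (L : Int) (hL : 1 ≤ L) (hLn : L ≤ (s.length : Int)) (t : List Char)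
    (ht : t.length = L.toNat) :
    (t ∈ (PySem.List.pyRange 0 ((s.length : Int) - L + 1)).map
        (fun j => PySem.List.slice s (some j) (some (j + L))) ↔ t <:+: s) := by
  constructor
  · intro h
    simp only [List.mem_map] at h
    obtain ⟨j, hj, rfl⟩ := h
    have hj0 : 0 ≤ j := (PySem.List.mem_pyRange_one.mp hj).1
    rw [PySem.List.slice_toNat s hj0 (by omega)]
    exact ((List.take_prefix _ _).isInfix).trans (List.drop_suffix _ _).isInfix
  · intro h
    obtain ⟨pre, suf, hps⟩ := h
    simp only [List.mem_map]
    have hlen : pre.length + t.length + suf.length = s.length := by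
      rw [← hps]
      simp only [List.length_append]
      try omega
    refine ⟨(pre.length : Int), ?_, ?_⟩
    · rw [PySem.List.mem_pyRange_one]
      exact ⟨by positivity, by omega⟩
    · rw [PySem.List.slice_toNat s (by positivity) (by omega)]
      rw [← hps]
      rw [show pre ++ t ++ suf = pre ++ (t ++ suf) by simp]
      rw [Int.toNat_natCast, List.drop_left]
      have hval : ((pre.length : Int) + L).toNat - pre.length = t.length := by omega
      rw [hval, List.take_left]

theorem pvBFor_true_iff (s : List Char) (subs : PySem.Set (List Char)) (L : Int) :
    ∀ (a b : Int), (pvBFor s subs L (PySem.List.pyRange a b) = true ↔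
      ∀ i, a ≤ i → i < b →
        ¬ (subs.contains ((PySem.List.slice s (some i) (some (i + L))).reverse) = true)) := by
  intro a b
  by_cases h : b ≤ a
  · rw [PySem.List.pyRange_one_eq_nil h]
    constructor
    · intro _ i h1 h2 _
      omega
    · intro _; rfl
  · push_neg at h
    obtain ⟨k, hk⟩ : ∃ k : Nat, b = a + 1 + (k : Int) := ⟨(b - a - 1).toNat, by omega⟩
    subst hk
    clear h
    induction k generalizing a with
    | zero =>
      rw [PySem.List.pyRange_one_cons (by omega), PySem.List.pyRange_one_eq_nil (by omega)]
      simp only [pvBFor, PySem.List.slice?_none_none_neg_one, Option.getD_some]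
      by_cases hc : subs.contains ((PySem.List.slice s (some a) (some (a + L))).reverse) = true
      · rw [if_pos hc]
        constructor
        · intro h'; exact absurd h' (by simp)
        · intro hall; exact absurd hc (hall a (le_refl _) (by omega))
      · rw [if_neg hc]
        constructor
        · intro _ i h1 h2
          have : i = a := by omega
          subst this
          exact hc
        · intro _; rfl
    | succ k ih =>
      rw [PySem.List.pyRange_one_cons (by omega)]
      simp only [pvBFor, PySem.List.slice?_none_none_neg_one, Option.getD_some]
      by_cases hc : subs.contains ((PySem.List.slice s (some a) (some (a + L))).reverse) = true
      · rw [if_pos hc]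
        constructor
        · intro h'; exact absurd h' (by simp)
        · intro hall; exact absurd hc (hall a (le_refl _) (by omega))
      · rw [if_neg hc]
        have hstep := ih (a + 1)
        rw [show a + 1 + 1 + (k : Int) = a + 1 + ((k + 1 : Nat) : Int) by push_cast; ring] at hstep
        rw [hstep]
        constructor
        · intro hall i h1 h2
          rcases lt_or_eq_of_le h1 with h' | h'
          · exact hall i (by omega) h2
          · subst h'; exact hc
        · intro hall i h1 h2
          exact hall i (by omega) h2

-- ===== VERDICT (by name: the statement is the Claim_ definition above) =====
theorem inverse_motif_repeat_spec : Claim_equal_inverse_motif_repeat := by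
  intro dna_motif max_repeat _
  unfold Spec_inverse_motif_repeat inverse_motif_repeat inverse_motif_repeat_alt
  simp only [PySem.Str.len_eq, PySem.List.len_eq]
  set s := dna_motif.toList with hs
  set n : Int := (s.length : Int) with hn
  set M := max_repeat with hM
  have hA := pvAWhile_char s M (n - 1)
  by_cases hg1 : n - 1 ≤ M ∨ n - 2 * (M + 1) < 1
  · rw [if_pos hg1]
    cases h' : pvAWhile s M (n - 1) with
    | true => rfl
    | false =>
      obtain ⟨h1, i, h2, h3, _⟩ := hA.mp h'
      rcases hg1 with h | h <;> omega
  · push_neg at hg1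
    obtain ⟨hg1a, hg1b⟩ := hg1
    rw [if_neg (by push_neg; exact ⟨hg1a, hg1b⟩)]
    by_cases hg2 : M + 1 ≤ 0
    · rw [if_pos hg2]
      exact hA.mpr ⟨by omega, pvHit_of_nonpos s (M + 1) hg2 (by omega)⟩
    · rw [if_neg hg2]
      have hL1 : 1 ≤ M + 1 := by omega
      have hBiff := pvBFor_true_iff s
        (PySem.Set.ofList ((PySem.List.pyRange 0 (n - (M + 1) + 1)).map
          (fun j => PySem.List.slice s (some j) (some (j + (M + 1))))))
        (M + 1) 0 (n - 2 * (M + 1))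
      by_cases hh : pvHit s (M + 1)
      · have hB : pvBFor s
            (PySem.Set.ofList ((PySem.List.pyRange 0 (n - (M + 1) + 1)).map
              (fun j => PySem.List.slice s (some j) (some (j + (M + 1))))))
            (M + 1) (PySem.List.pyRange 0 (n - 2 * (M + 1))) = false := by
          rw [Bool.eq_false_iff, ne_eq, hBiff]
          intro hall
          obtain ⟨i, h1, h2, h3⟩ := hh
          apply hall i h1 h2
          rw [PySem.Set.contains_iff, PySem.Set.mem_ofList]
          rw [hn]
          rw [pvMem_subs s (M + 1) hL1 (by omega) _
            (by rw [List.length_reverse]; exact pvSlice_len s i (M + 1) h1 (by omega) (by omega))]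
          exact h3
        rw [hB]
        exact hA.mpr ⟨by omega, hh⟩
      · have hB : pvBFor s
            (PySem.Set.ofList ((PySem.List.pyRange 0 (n - (M + 1) + 1)).map
              (fun j => PySem.List.slice s (some j) (some (j + (M + 1))))))
            (M + 1) (PySem.List.pyRange 0 (n - 2 * (M + 1))) = true := by
          rw [hBiff]
          intro i h1 h2 hc
          rw [PySem.Set.contains_iff, PySem.Set.mem_ofList] at hc
          rw [hn] at h2 hc
          rw [pvMem_subs s (M + 1) hL1 (by omega) _
            (by rw [List.length_reverse]; exact pvSlice_len s i (M + 1) h1 (by omega) (by omega))] at hc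
          exact hh ⟨i, h1, by omega, hc⟩
        rw [hB]
        cases h' : pvAWhile s M (n - 1) with
        | true => rfl
        | false => exact absurd (hA.mp h').2 hh
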